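-- pv_equiv track=rewrite | github.com/winladaa/backend-exam-swd-da | backend-exam-master/3_number_to_thai/main.py | number_to_thai
-- ===== SOURCE A (Python) =====
-- def number_to_thai(number: int) -> str:
--     if number < 0:
--         return 'number can not less than 0'
--
--     units = {0: '', 1: 'หนึ่ง', 2: 'สอง', 3: 'สาม', 4: 'สี่',
--         5: 'ห้า', 6: 'หก', 7: 'เจ็ด', 8: 'แปด', 9: 'เก้า'
--     }
--     tens = ['', 'สิบ', 'ร้อย', 'พัน', 'หมื่น', 'แสน', 'ล้าน']
--
--     if number == 0:
--         return 'ศูนย์'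
--
--     text = ''
--     place = 0
--
--     while number > 0:
--         digit = number % 10
--         if digit == 1 and place == 0:
--             text = 'เอ็ด'
--         elif digit != 0 or place == 0:
--             text = units[digit] + tens[place] + text
--         number //= 10
--         place += 1
--
--     text = text.replace('หนึ่งสิบ', 'สิบ')
--
--     return text
-- ===== SOURCE B (Python) =====
-- def number_to_thai(number: int) -> str:
--     if number < 0:
--         return 'number can not less than 0'
--     if number == 0:
--         return 'ศูนย์'
--
--     units = ['', 'หนึ่ง', 'สอง', 'สาม', 'สี่', 'ห้า', 'หก', 'เจ็ด', 'แปด', 'เก้า']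
--     tens = ['', 'สิบ', 'ร้อย', 'พัน', 'หมื่น', 'แสน', 'ล้าน']
--
--     # phase 1: extract the decimal digits, least significant first
--     digits = []
--     n = number
--     while n > 0:
--         digits.append(n % 10)
--         n //= 10
--
--     # phase 2: render most-significant-first, collecting segments in a list
--     parts = []
--     for p in range(len(digits) - 1, -1, -1):
--         d = digits[p]
--         if d == 0:
--             continue
--         if p == 0 and d == 1:
--             parts.append('เอ็ด')
--         elif p == 1 and d == 1:
--             parts.append('สิบ')
--         else:
--             parts.append(units[d] + tens[p])
--     return ''.join(parts)
-- ===== Notes on version B (the rewrite author's own statement) =====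
-- stated objective: idiomatic
-- what changed: B splits A's fused digit loop into two phases -- extract the decimal digits, then render them most-significant-first into a list of segments joined at the end -- replacing A's string prepending, its units dict and its trailing text.replace of the one-ten prefix with an explicit tens-place rule.
import Mathlib
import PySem

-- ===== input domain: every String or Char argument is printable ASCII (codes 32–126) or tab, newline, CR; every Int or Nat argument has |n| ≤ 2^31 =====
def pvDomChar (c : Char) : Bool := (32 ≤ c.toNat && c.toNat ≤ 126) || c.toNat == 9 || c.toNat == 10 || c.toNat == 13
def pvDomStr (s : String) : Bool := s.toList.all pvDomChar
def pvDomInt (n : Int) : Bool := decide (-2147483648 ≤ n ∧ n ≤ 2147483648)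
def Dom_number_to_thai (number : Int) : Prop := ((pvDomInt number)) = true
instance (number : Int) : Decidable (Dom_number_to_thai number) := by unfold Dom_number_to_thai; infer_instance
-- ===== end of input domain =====

-- B renders the digits most-significant-first into a list of segments joined at the end
-- (no string prepending, no units dict, no trailing replace); objective: idiomatic, not faster.

-- ===== PORT A =====
def thaiUnits : PySem.Dict Int String :=
  PySem.Dict.mk [(0, ""), (1, "หนึ่ง"), (2, "สอง"), (3, "สาม"), (4, "สี่"),
    (5, "ห้า"), (6, "หก"), (7, "เจ็ด"), (8, "แปด"), (9, "เก้า")]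

def thaiTens : List String := ["", "สิบ", "ร้อย", "พัน", "หมื่น", "แสน", "ล้าน"]

-- the while loop; units[digit] is always present (digit ∈ 0..9), so getD "" is exact;
-- tens[place] raises IndexError for place ≥ 7 (pyGet? = none) — excluded by Pre_ below
def numberToThaiLoop (number place : Int) (text : String) : String :=
  if h : 0 < number then
    let digit := PySem.Int.mod number 10
    let text' :=
      if digit = 1 ∧ place = 0 then "เอ็ด"
      else if digit ≠ 0 ∨ place = 0 then
        ((thaiUnits.get? digit).getD "") ++ ((PySem.List.pyGet? thaiTens place).getD "") ++ text
      else text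
    numberToThaiLoop (PySem.Int.floordiv number 10) (place + 1) text'
  else text
termination_by number.toNat
decreasing_by
  rw [PySem.Int.floordiv_eq_ediv_of_pos (by norm_num : (0:Int) < 10)]
  omega

def number_to_thai (number : Int) : String :=
  if number < 0 then "number can not less than 0"
  else if number = 0 then "ศูนย์"
  else PySem.Str.replace (numberToThaiLoop number 0 "") "หนึ่งสิบ" "สิบ"

-- ===== PORT B =====
def altUnits : List String :=
  ["", "หนึ่ง", "สอง", "สาม", "สี่", "ห้า", "หก", "เจ็ด", "แปด", "เก้า"]

def altTens : List String := ["", "สิบ", "ร้อย", "พัน", "หมื่น", "แสน", "ล้าน"]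

-- phase 1: the decimal digits, least significant first
def altDigits (n : Int) : List Int :=
  if h : 0 < n then PySem.Int.mod n 10 :: altDigits (PySem.Int.floordiv n 10) else []
termination_by n.toNat
decreasing_by
  rw [PySem.Int.floordiv_eq_ediv_of_pos (by norm_num : (0:Int) < 10)]
  omega

def number_to_thai_alt (number : Int) : String :=
  if number < 0 then "number can not less than 0"
  else if number = 0 then "ศูนย์"
  else
    let digits := altDigits number
    -- phase 2: render most-significant-first, collecting segments in a list
    let parts := (PySem.List.pyRange ((digits.length : Int) - 1) (-1) (-1)).foldl
      (fun parts p =>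
        let d := PySem.List.pyGetD digits p 0
        if d = 0 then parts
        else if p = 0 ∧ d = 1 then parts ++ ["เอ็ด"]
        else if p = 1 ∧ d = 1 then parts ++ ["สิบ"]
        else parts ++ [PySem.List.pyGetD altUnits d "" ++ PySem.List.pyGetD altTens p ""]) []
    PySem.Str.join "" parts

-- ===== PRECONDITION & SPEC =====
-- Pre_ excludes number ≥ 10^7, where A raises IndexError (tens has only 7 entries); B raises there too.
def Pre_number_to_thai (number : Int) : Prop := number < 10000000
instance (number : Int) : Decidable (Pre_number_to_thai number) := by
  unfold Pre_number_to_thai; infer_instance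

def pvWitness_number_to_thai : Int := 1234567

def Spec_number_to_thai (number : Int) (out : String) : Prop := out = number_to_thai_alt number
instance (number : Int) (out : String) : Decidable (Spec_number_to_thai number out) := by
  unfold Spec_number_to_thai; infer_instance

-- ===== CLAIM (what is proved, stated in full; the proofs are below) =====
def Claim_equal_number_to_thai : Prop := ∀ (number : Int), Dom_number_to_thai number →
  Pre_number_to_thai number → Spec_number_to_thai number (number_to_thai number)

-- ===== LEMMAS AND PROOFS =====

-- the replace pattern 'หนึ่งสิบ' and replacement 'สิบ' as character lists
def patL : List Char := ['ห', 'น', 'ึ', '่', 'ง', 'ส', 'ิ', 'บ']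
def newL : List Char := ['ส', 'ิ', 'บ']

-- reference form of str.replace with this fixed pattern
def rep : List Char → List Char
  | [] => []
  | c :: t =>
    if patL.isPrefixOf (c :: t) then newL ++ rep ((c :: t).drop patL.length)
    else c :: rep t
termination_by l => l.length
decreasing_by
  all_goals simp [patL]
  all_goals omega

lemma go_eq_rep : ∀ (fuel : Nat) (l acc : List Char), l.length ≤ fuel →
    PySem.Chars.replace.go patL newL fuel l acc = acc.reverse ++ rep l := by
  intro fuel
  induction fuel with
  | zero =>
    intro l acc h
    have : l = [] := by cases l <;> simp_all
    subst this
    simp [PySem.Chars.replace.go, rep]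
  | succ f ih =>
    intro l acc h
    cases l with
    | nil => simp [PySem.Chars.replace.go, rep]
    | cons c t =>
      rw [PySem.Chars.replace.go]
      by_cases hp : patL.isPrefixOf (c :: t)
      · rw [if_pos hp]
        rw [ih _ _ (by simp [patL] at h ⊢; omega)]
        rw [rep, if_pos hp]
        simp
      · rw [if_neg hp]
        rw [ih _ _ (by simp at h ⊢; omega)]
        rw [rep, if_neg hp]
        simp

lemma replace_eq_rep (s : String) :
    PySem.Str.replace s "หนึ่งสิบ" "สิบ" = String.ofList (rep s.toList) := by
  have h1 : "หนึ่งสิบ".toList = patL := by decide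
  have h2 : "สิบ".toList = newL := by decide
  rw [PySem.Str.replace, h1, h2, PySem.Chars.replace]
  rw [if_neg (by decide)]
  rw [go_eq_rep _ _ _ (le_refl _)]
  simp

-- w is 'safe': no occurrence of the pattern can start inside w, whatever follows
def safeW (w : List Char) : Bool :=
  (List.range w.length).all fun i =>
    !(patL.isPrefixOf (w.drop i)) && !((w.drop i).isPrefixOf patL)

lemma prefix_split {p x y : List Char} (h : p <+: x ++ y) : p <+: x ∨ x <+: p := by
  obtain ⟨r, hr⟩ := h
  by_cases hl : p.length ≤ x.length
  · left
    have := congrArg (List.take p.length) hr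
    rw [List.take_append_of_le_length hl, List.take_left] at this
    exact this ▸ List.take_prefix _ _
  · right
    have := congrArg (List.take x.length) hr
    rw [List.take_left, List.take_append_of_le_length (by omega)] at this
    exact this.symm ▸ List.take_prefix _ _

lemma safeW_tail {c : Char} {w : List Char} (h : safeW (c :: w) = true) : safeW w = true := by
  simp only [safeW, List.all_eq_true, List.mem_range] at h ⊢
  intro i hi
  have := h (i + 1) (by simp; omega)
  simpa using this

lemma rep_append_of_safe : ∀ (w t : List Char), safeW w = true → rep (w ++ t) = w ++ rep t := by
  intro w
  induction w with
  | nil => simp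
  | cons c w' ih =>
    intro t hs
    have h0 : ¬ patL.isPrefixOf (c :: (w' ++ t)) = true := by
      intro hp
      have h00 := (List.all_eq_true.mp hs) 0 (by simp)
      simp only [List.drop_zero, Bool.and_eq_true, Bool.not_eq_true'] at h00
      have hp' : patL <+: (c :: w') ++ t := by
        simpa using List.isPrefixOf_iff_prefix.mp hp
      rcases prefix_split hp' with hh | hh
      · exact absurd (List.isPrefixOf_iff_prefix.mpr hh) (by simp [h00.1])
      · exact absurd (List.isPrefixOf_iff_prefix.mpr hh) (by simp [h00.2])
    rw [List.cons_append, rep, if_neg h0, ih t (safeW_tail hs)]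
    simp

lemma rep_nil : rep [] = [] := by rw [rep]

lemma rep_of_safe (w : List Char) (h : safeW w = true) : rep w = w := by
  have := rep_append_of_safe w [] h
  simpa [rep_nil] using this

lemma rep_fire (t : List Char) : rep (patL ++ t) = newL ++ rep t := by
  have hp : patL.isPrefixOf (patL ++ t) = true :=
    List.isPrefixOf_iff_prefix.mpr (List.prefix_append _ _)
  show rep ('ห' :: (['น', 'ึ', '่', 'ง', 'ส', 'ิ', 'บ'] ++ t)) = newL ++ rep t
  rw [rep]
  rw [if_pos (by simpa [patL] using hp)]
  have hdrop : List.drop patL.length ('ห' :: (['น', 'ึ', '่', 'ง', 'ส', 'ิ', 'บ'] ++ t)) = t := by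
    simp [patL]
  rw [hdrop]

-- per-place segments of A's loop and of B's renderer, as character lists
def segA (d p : Int) : List Char :=
  if d = 1 ∧ p = 0 then "เอ็ด".toList
  else if d ≠ 0 ∨ p = 0 then
    ((thaiUnits.get? d).getD "").toList ++ ((PySem.List.pyGet? thaiTens p).getD "").toList
  else []

def segB (d p : Int) : List Char :=
  if d = 0 then []
  else if p = 0 ∧ d = 1 then "เอ็ด".toList
  else if p = 1 ∧ d = 1 then "สิบ".toList
  else (PySem.List.pyGetD altUnits d "").toList ++ (PySem.List.pyGetD altTens p "").toList

def textA : List Int → Int → List Char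
  | [], _ => []
  | d :: ds, p => textA ds (p + 1) ++ segA d p

def textB : List Int → Int → List Char
  | [], _ => []
  | d :: ds, p => textB ds (p + 1) ++ segB d p

lemma altDigits_bounds : ∀ (n : Int), ∀ d ∈ altDigits n, 0 ≤ d ∧ d < 10 := by
  intro n
  rw [altDigits]
  by_cases h : 0 < n
  · rw [dif_pos h]
    intro d hd
    rcases List.mem_cons.mp hd with h1 | h1
    · subst h1
      exact ⟨PySem.Int.mod_nonneg _ (by norm_num), PySem.Int.mod_lt _ (by norm_num)⟩
    · exact altDigits_bounds _ d h1
  · rw [dif_neg h]; simp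
termination_by n => n.toNat
decreasing_by
  rw [PySem.Int.floordiv_eq_ediv_of_pos (by norm_num : (0:Int) < 10)]
  omega

lemma altDigits_length : ∀ (k : Nat) (n : Int), n < 10 ^ k → (altDigits n).length ≤ k := by
  intro k
  induction k with
  | zero =>
    intro n hn
    rw [altDigits, dif_neg (by simp at hn; omega)]
    simp
  | succ k ih =>
    intro n hn
    rw [altDigits]
    by_cases h : 0 < n
    · rw [dif_pos h]
      simp only [List.length_cons]
      have hlt : PySem.Int.floordiv n 10 < 10 ^ k := by
        rw [PySem.Int.floordiv_eq_ediv_of_pos (by norm_num : (0:Int) < 10)]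
        have : (10:Int) ^ (k + 1) = 10 ^ k * 10 := by ring
        omega
      have := ih _ hlt
      omega
    · rw [dif_neg h]; simp

-- A's loop, characterised (place ≥ 1: the เอ็ด branch cannot fire)
lemma loop_toList : ∀ (n place : Int) (text : String), 1 ≤ place →
    (numberToThaiLoop n place text).toList = textA (altDigits n) place ++ text.toList := by
  intro n place text hp
  rw [numberToThaiLoop, altDigits]
  by_cases h : 0 < n
  · rw [dif_pos h, dif_pos h]
    simp only []
    rw [loop_toList _ _ _ (by omega : 1 ≤ place + 1)]
    rw [textA]
    rw [if_neg (by omega : ¬ (PySem.Int.mod n 10 = 1 ∧ place = 0))]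
    by_cases hd : PySem.Int.mod n 10 = 0
    · rw [if_neg (by omega : ¬ (PySem.Int.mod n 10 ≠ 0 ∨ place = 0))]
      have : segA (PySem.Int.mod n 10) place = [] := by
        rw [segA, if_neg (by omega), if_neg (by omega)]
      rw [this]
      simp
    · rw [if_pos (Or.inl hd)]
      have : segA (PySem.Int.mod n 10) place =
          ((thaiUnits.get? (PySem.Int.mod n 10)).getD "").toList ++
          ((PySem.List.pyGet? thaiTens place).getD "").toList := by
        rw [segA, if_neg (by omega), if_pos (Or.inl hd)]
      rw [String.toList_append, String.toList_append, this]
      simp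
  · rw [dif_neg h, dif_neg h]
    simp [textA]
termination_by n _ _ _ => n.toNat
decreasing_by
  rw [PySem.Int.floordiv_eq_ediv_of_pos (by norm_num : (0:Int) < 10)]
  omega

lemma A_toList (n : Int) (h : 0 < n) :
    (numberToThaiLoop n 0 "").toList = textA (altDigits n) 0 := by
  rw [numberToThaiLoop, dif_pos h]
  conv_rhs => rw [altDigits, dif_pos h]
  simp only []
  rw [loop_toList _ _ _ (by omega : (1:Int) ≤ 0 + 1)]
  rw [textA]
  congr 1
  rw [segA]
  have hemp : "".toList = ([] : List Char) := by decide
  split_ifs <;> simp_all [String.toList_append, hemp]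

-- ===== segment facts (finite digit/place case analysis) =====

lemma safeW_segA_high (d p : Int) (h1 : 0 ≤ d) (h2 : d < 10) (h3 : 2 ≤ p) (h4 : p ≤ 6) :
    safeW (segA d p) = true := by
  interval_cases d <;> interval_cases p <;> decide

lemma safeW_segA_one (d : Int) (h1 : 0 ≤ d) (h2 : d < 10) (hne : d ≠ 1) :
    safeW (segA d 1) = true := by
  interval_cases d <;> first | decide | omega

lemma safeW_segA_zero (d : Int) (h1 : 0 ≤ d) (h2 : d < 10) : safeW (segA d 0) = true := by
  interval_cases d <;> decide

lemma segA_one_one : segA 1 1 = patL := by decide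

lemma segB_eq_segA_high (d p : Int) (h1 : 0 ≤ d) (h2 : d < 10) (h3 : 2 ≤ p) (h4 : p ≤ 6) :
    segB d p = segA d p := by
  interval_cases d <;> interval_cases p <;> decide

lemma segB_eq_segA_one (d : Int) (h1 : 0 ≤ d) (h2 : d < 10) (hne : d ≠ 1) :
    segB d 1 = segA d 1 := by
  interval_cases d <;> first | decide | omega

lemma segB_one_one : segB 1 1 = newL := by decide

lemma segB_eq_segA_zero (d : Int) (h1 : 0 ≤ d) (h2 : d < 10) : segB d 0 = segA d 0 := by
  interval_cases d <;> decide

-- the high part (places ≥ 2) is transparent to the replace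
lemma rep_textA_high : ∀ (ds : List Int) (p : Int) (t : List Char), 2 ≤ p →
    p + ds.length ≤ 7 → (∀ d ∈ ds, 0 ≤ d ∧ d < 10) →
    rep (textA ds p ++ t) = textA ds p ++ rep t := by
  intro ds
  induction ds with
  | nil => simp [textA]
  | cons d ds ih =>
    intro p t hp hlen hb
    rw [textA, List.append_assoc]
    rw [ih (p + 1) _ (by omega) (by simp at hlen ⊢; omega) (fun x hx => hb x (List.mem_cons_of_mem _ hx))]
    rw [rep_append_of_safe _ _ (safeW_segA_high d p (hb d (List.mem_cons_self)).1
      (hb d (List.mem_cons_self)).2 hp (by simp at hlen; omega))]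
    simp [List.append_assoc]

lemma textB_eq_textA_high : ∀ (ds : List Int) (p : Int), 2 ≤ p →
    p + ds.length ≤ 7 → (∀ d ∈ ds, 0 ≤ d ∧ d < 10) → textB ds p = textA ds p := by
  intro ds
  induction ds with
  | nil => simp [textA, textB]
  | cons d ds ih =>
    intro p hp hlen hb
    rw [textA, textB]
    rw [ih (p + 1) (by omega) (by simp at hlen ⊢; omega) (fun x hx => hb x (List.mem_cons_of_mem _ hx))]
    rw [segB_eq_segA_high d p (hb d (List.mem_cons_self)).1 (hb d (List.mem_cons_self)).2 hp
      (by simp at hlen; omega)]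

-- ===== B's fold, characterised =====

def optPart (ds : List Int) (j : Nat) : List String :=
  let d := ds.getD j 0
  if d = 0 then []
  else if (j : Int) = 0 ∧ d = 1 then ["เอ็ด"]
  else if (j : Int) = 1 ∧ d = 1 then ["สิบ"]
  else [PySem.List.pyGetD altUnits d "" ++ PySem.List.pyGetD altTens (j : Int) ""]

def partsOf (ds : List Int) : Nat → List String
  | 0 => []
  | j + 1 => optPart ds j ++ partsOf ds j

lemma fold_parts (ds : List Int) : ∀ (j : Nat) (acc : List String),
    (PySem.List.pyRange ((j : Int) - 1) (-1) (-1)).foldl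
      (fun parts p =>
        let d := PySem.List.pyGetD ds p 0
        if d = 0 then parts
        else if p = 0 ∧ d = 1 then parts ++ ["เอ็ด"]
        else if p = 1 ∧ d = 1 then parts ++ ["สิบ"]
        else parts ++ [PySem.List.pyGetD altUnits d "" ++ PySem.List.pyGetD altTens p ""]) acc
      = acc ++ partsOf ds j := by
  intro j
  induction j with
  | zero =>
    intro acc
    rw [PySem.List.pyRange_neg_one_eq_nil (by norm_num)]
    simp [partsOf]
  | succ j ih =>
    intro acc
    have hcast : ((j + 1 : Nat) : Int) - 1 = (j : Int) := by push_cast; ring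
    rw [hcast, PySem.List.pyRange_neg_one_cons (by omega : (-1:Int) < (j : Int))]
    rw [List.foldl_cons, ih]
    have hstep : (let d := PySem.List.pyGetD ds (j : Int) 0
        if d = 0 then acc
        else if (j : Int) = 0 ∧ d = 1 then acc ++ ["เอ็ด"]
        else if (j : Int) = 1 ∧ d = 1 then acc ++ ["สิบ"]
        else acc ++ [PySem.List.pyGetD altUnits d "" ++ PySem.List.pyGetD altTens (j : Int) ""])
        = acc ++ optPart ds j := by
      rw [optPart]
      simp only [PySem.List.pyGetD_natCast]
      split_ifs <;> simp
    rw [partsOf, hstep]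
    simp

lemma join_flatten : ∀ (LL : List (List Char)), PySem.Chars.join [] LL = LL.flatten := by
  intro LL
  induction LL with
  | nil => rw [PySem.Chars.join_nil]; rfl
  | cons a rest ih =>
    cases rest with
    | nil => rw [PySem.Chars.join_singleton]; simp
    | cons b rest' =>
      rw [PySem.Chars.join_cons_cons, ih]
      simp

lemma textB_append : ∀ (xs ys : List Int) (p : Int),
    textB (xs ++ ys) p = textB ys (p + xs.length) ++ textB xs p := by
  intro xs
  induction xs with
  | nil => simp [textB]
  | cons x xs ih =>
    intro ys p
    rw [List.cons_append, textB, textB, ih]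
    simp only [List.length_cons]
    have : p + 1 + (xs.length : Int) = p + ((xs.length : Int) + 1) := by ring
    rw [this]
    push_cast
    simp [List.append_assoc]

lemma join_partsOf : ∀ (ds : List Int) (j : Nat), j ≤ ds.length →
    PySem.Chars.join [] ((partsOf ds j).map String.toList) = textB (ds.take j) 0 := by
  intro ds j
  induction j with
  | zero => intro _; simp [partsOf, textB, join_flatten]
  | succ j ih =>
    intro hj
    have hjlt : j < ds.length := by omega
    have hget : ds.getD j 0 = ds[j] := by simp [List.getD, List.getElem?_eq_getElem hjlt]
    have hopt : (List.map String.toList (optPart ds j)).flatten = segB ds[j] (j : Int) := by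
      rw [optPart, segB, hget]
      split_ifs <;> simp_all [String.toList_append]
    have hlen : ((List.take j ds).length : Int) = (j : Int) := by
      simp [List.length_take, Nat.min_eq_left (by omega : j ≤ ds.length)]
    have htake : List.take (j + 1) ds = List.take j ds ++ [ds[j]] := by
      rw [List.take_add_one]
      simp [List.getElem?_eq_getElem hjlt]
    rw [partsOf, join_flatten]
    simp only [List.map_append, List.flatten_append]
    have ih' := ih (by omega)
    rw [join_flatten] at ih'
    rw [ih', hopt, htake, textB_append]
    simp [textB]
    congr 1
    omega

lemma B_eval (n : Int) (h : 0 < n) :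
    number_to_thai_alt n = String.ofList (textB (altDigits n) 0) := by
  rw [number_to_thai_alt, if_neg (by omega), if_neg (by omega)]
  simp only []
  rw [fold_parts (altDigits n) (altDigits n).length []]
  rw [PySem.Str.join]
  congr 1
  have h1 : "".toList = ([] : List Char) := by decide
  rw [h1]
  simp only [List.nil_append]
  rw [join_partsOf _ _ (le_refl _)]
  rw [List.take_length]

-- ===== the main computation =====

lemma rep_textA_eq_textB (n : Int) (h : 0 < n) (hlt : n < 10000000) :
    rep (textA (altDigits n) 0) = textB (altDigits n) 0 := by
  have hb := altDigits_bounds n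
  have hlen : (altDigits n).length ≤ 7 := altDigits_length 7 n (by norm_num; omega)
  have hne : altDigits n ≠ [] := by
    rw [altDigits, dif_pos h]; simp
  obtain ⟨d0, ds', hds⟩ := List.exists_cons_of_ne_nil hne
  rw [hds] at hb hlen ⊢
  have hd0 := hb d0 (List.mem_cons_self)
  cases ds' with
  | nil =>
    rw [textA, textB, textA, textB]
    simp only [List.nil_append]
    rw [rep_of_safe _ (safeW_segA_zero d0 hd0.1 hd0.2)]
    rw [segB_eq_segA_zero d0 hd0.1 hd0.2]
  | cons d1 rest =>
    have hd1 := hb d1 (List.mem_cons_of_mem _ (List.mem_cons_self))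
    have hrest : ∀ d ∈ rest, 0 ≤ d ∧ d < 10 := fun d hd =>
      hb d (List.mem_cons_of_mem _ (List.mem_cons_of_mem _ hd))
    have hrlen : (2 : Int) + rest.length ≤ 7 := by
      simp only [List.length_cons] at hlen
      push_cast; omega
    rw [textA, textA, textB, textB]
    have e2 : (0:Int) + 1 + 1 = 2 := by norm_num
    have e1 : (0:Int) + 1 = 1 := by norm_num
    rw [e2, e1]
    rw [List.append_assoc]
    rw [rep_textA_high rest 2 _ (by norm_num) hrlen hrest]
    rw [textB_eq_textA_high rest 2 (by norm_num) hrlen hrest]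
    rw [List.append_assoc]
    congr 1
    by_cases h1 : d1 = 1
    · subst h1
      rw [segA_one_one, segB_one_one, rep_fire]
      rw [rep_of_safe _ (safeW_segA_zero d0 hd0.1 hd0.2)]
      rw [segB_eq_segA_zero d0 hd0.1 hd0.2]
    · rw [rep_append_of_safe _ _ (safeW_segA_one d1 hd1.1 hd1.2 h1)]
      rw [rep_of_safe _ (safeW_segA_zero d0 hd0.1 hd0.2)]
      rw [segB_eq_segA_one d1 hd1.1 hd1.2 h1, segB_eq_segA_zero d0 hd0.1 hd0.2]

-- ===== VERDICT (by name: the statement is the Claim_ definition above) =====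
theorem number_to_thai_spec : Claim_equal_number_to_thai := by
  intro n _ hpre
  unfold Spec_number_to_thai
  by_cases hneg : n < 0
  · rw [number_to_thai, if_pos hneg, number_to_thai_alt, if_pos hneg]
  · by_cases hz : n = 0
    · subst hz
      rw [number_to_thai, if_neg (by omega), if_pos rfl,
        number_to_thai_alt, if_neg (by omega), if_pos rfl]
    · have h : 0 < n := by omega
      rw [number_to_thai, if_neg hneg, if_neg hz]
      rw [replace_eq_rep]
      rw [B_eval n h]
      congr 1
      rw [A_toList n h]
      exact rep_textA_eq_textB n h hpre
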